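-- pv_equiv track=rewrite | github.com/syazra/prak-daspro | Hackerrank/8/8B1_Soal Bergambar.py | Kanan
-- ===== SOURCE A (Python) =====
-- def Konso(e,S):
--     return [e] + S
--
-- def FirstElmt(S):
--     return S[0]
--
-- def Tail(S):
--     return S[1:]
--
-- def IsEmpty(S):
--     return S == []
--
-- def Kanan1(S, X):
--     if IsEmpty(S) or X == 0:
--         return []
--     else:
--         return Konso(FirstElmt(S), Kanan1(Tail(S), X-1))
--
-- def Kanan(S, X):
--     if IsEmpty(S) or X == 0:
--         return []
--     else:
--         if FirstElmt(S) == X: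
--             return Kanan1(Tail(S), X)
--         else:
--             return Kanan(Tail(S), X)
-- ===== SOURCE B (Python) =====
-- def Kanan(S, X):
--     if X <= 0 or X not in S:
--         return []
--     rest = S[S.index(X) + 1:]
--     return rest[:X]
-- ===== Notes on version B (the rewrite author's own statement) =====
-- stated objective: faster
-- what changed: Replaced A's recursion (which copies the whole tail with S[1:] at every step) by a single list.index lookup followed by one slice of the next X elements.
-- intended difference: For negative X occurring in S before its last element, A returns the whole tail after the first occurrence of X (its countdown never reaches 0), while B returns [] — the intended 'take no elements' result for a non-positive count. — e.g. on Kanan([-1, 5], -1): A returns [5], B returns []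
import Mathlib
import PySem

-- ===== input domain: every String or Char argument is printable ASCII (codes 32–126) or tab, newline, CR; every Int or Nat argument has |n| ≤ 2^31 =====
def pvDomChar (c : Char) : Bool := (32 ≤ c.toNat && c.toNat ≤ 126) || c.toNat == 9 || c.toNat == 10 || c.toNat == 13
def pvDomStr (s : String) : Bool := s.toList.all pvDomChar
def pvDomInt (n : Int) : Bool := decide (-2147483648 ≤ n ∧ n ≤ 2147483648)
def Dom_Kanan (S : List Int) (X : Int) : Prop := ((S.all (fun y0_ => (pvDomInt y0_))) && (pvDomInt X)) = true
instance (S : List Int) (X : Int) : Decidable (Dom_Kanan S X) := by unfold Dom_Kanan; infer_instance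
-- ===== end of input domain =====

-- B replaces A's quadratic recursion (tail-copying scan plus a recursive copier) by one index
-- lookup and one slice; for negative X found before S's last element B returns [] where A
-- accidentally returns the whole tail (stated as the intended difference D_Kanan below).

-- ===== PORT A =====
-- Kanan1(S, X): copy the first X elements of S (all of S if X < 0)
def Kanan1 (S : List Int) (X : Int) : List Int :=
  match S with
  | [] => []                                   -- IsEmpty(S) (or X == 0, checked below)
  | h :: t => if X = 0 then [] else h :: Kanan1 t (X - 1)   -- Konso(FirstElmt(S), Kanan1(Tail(S), X-1))

def Kanan (S : List Int) (X : Int) : List Int :=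
  match S with
  | [] => []
  | h :: t =>
      if X = 0 then []
      else if h = X then Kanan1 t X            -- FirstElmt(S) == X
      else Kanan t X                           -- Kanan(Tail(S), X)

-- ===== PORT B =====
-- Source B: if X <= 0 or X not in S: return [];  rest = S[S.index(X)+1:];  return rest[:X]
def Kanan_alt (S : List Int) (X : Int) : List Int :=
  if X ≤ 0 ∨ X ∉ S then []
  else
    let rest := PySem.List.slice S (some ((S.idxOf X : Int) + 1)) none
    PySem.List.slice rest none (some X)

-- ===== PRECONDITION & SPEC =====
-- For negative X occurring in S before its last element, A returns the whole tail after the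
-- first occurrence of X (its countdown never reaches 0), while B returns [] — the intended
-- 'take no elements' result for a non-positive count.
def D_Kanan (S : List Int) (X : Int) : Prop := X < 0 ∧ X ∈ S.dropLast
instance (S : List Int) (X : Int) : Decidable (D_Kanan S X) := by unfold D_Kanan; infer_instance

def Spec_Kanan (S : List Int) (X : Int) (out : List Int) : Prop := ¬ D_Kanan S X → out = Kanan_alt S X
instance (S : List Int) (X : Int) (out : List Int) : Decidable (Spec_Kanan S X out) := by unfold Spec_Kanan; infer_instance

def pvDiffWitness_Kanan : List Int × Int := ([-1, 5], -1)
def pvDiffWitnessOut_Kanan : (List Int) × (List Int) := ([5], [])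

-- ===== CLAIM (what is proved, stated in full; the proofs are below) =====
def Claim_unchanged_Kanan : Prop := ∀ (S : List Int) (X : Int), Dom_Kanan S X → Spec_Kanan S X (Kanan S X)
def Claim_changed_Kanan : Prop := Dom_Kanan (pvDiffWitness_Kanan.1) (pvDiffWitness_Kanan.2) ∧ D_Kanan (pvDiffWitness_Kanan.1) (pvDiffWitness_Kanan.2) ∧ Kanan (pvDiffWitness_Kanan.1) (pvDiffWitness_Kanan.2) = pvDiffWitnessOut_Kanan.1 ∧ Kanan_alt (pvDiffWitness_Kanan.1) (pvDiffWitness_Kanan.2) = pvDiffWitnessOut_Kanan.2 ∧ pvDiffWitnessOut_Kanan.1 ≠ pvDiffWitnessOut_Kanan.2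
def Claim_exact_Kanan : Prop := ∀ (S : List Int) (X : Int), Dom_Kanan S X → D_Kanan S X → Kanan S X ≠ Kanan_alt S X

-- ===== LEMMAS AND PROOFS =====

-- Closed form of A's copier.
theorem Kanan1_eq (S : List Int) (X : Int) :
    Kanan1 S X = if X = 0 then [] else if X < 0 then S else S.take X.toNat := by
  induction S generalizing X with
  | nil => simp only [Kanan1]; split_ifs <;> simp
  | cons h t ih =>
      simp only [Kanan1]
      by_cases h0 : X = 0
      · simp [h0]
      · rw [ih (X - 1)]
        by_cases hneg : X < 0
        · have : X - 1 ≠ 0 := by omega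
          simp [h0, hneg, this, show X - 1 < 0 by omega]
        · by_cases h1 : X = 1
          · simp [h1]
          · have hx1 : ¬ (X - 1 = 0) := by omega
            have hx2 : ¬ (X - 1 < 0) := by omega
            simp only [h0, hneg, hx1, hx2, if_false]
            have : X.toNat = (X - 1).toNat + 1 := by omega
            rw [this, List.take_succ_cons]

-- B returns nothing for a non-positive count.
theorem alt_nonpos (S : List Int) (X : Int) (h : X ≤ 0) : Kanan_alt S X = [] := by
  simp [Kanan_alt, h]

-- B ignores a non-matching head.
theorem alt_cons_ne (h X : Int) (t : List Int) (hne : h ≠ X) :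
    Kanan_alt (h :: t) X = Kanan_alt t X := by
  unfold Kanan_alt
  by_cases hm : X ∈ t
  · have hmem : X ∈ h :: t := List.mem_cons_of_mem _ hm
    have hidx : (h :: t).idxOf X = t.idxOf X + 1 := by simp [hne]
    by_cases h0 : X ≤ 0
    · simp [h0]
    · simp only [h0, hm, hmem, not_true_eq_false, or_false, if_false]
      have e1 : ((h :: t).idxOf X : Int) + 1 = ((t.idxOf X + 2 : Nat) : Int) := by
        rw [hidx]; push_cast; ring
      have e2 : ((t.idxOf X : Int)) + 1 = ((t.idxOf X + 1 : Nat) : Int) := by push_cast; ring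
      rw [e1, e2, PySem.List.slice_from_natCast, PySem.List.slice_from_natCast]
      simp [List.drop_succ_cons]
  · have hmem : X ∉ h :: t := by simp [hm, Ne.symm hne]
    simp [hm, hmem]

-- B on a matching positive head.
theorem alt_cons_self (X : Int) (t : List Int) (h0 : 0 < X) :
    Kanan_alt (X :: t) X = t.take X.toNat := by
  unfold Kanan_alt
  have hmem : X ∈ X :: t := List.mem_cons_self
  have hidx : (X :: t).idxOf X = 0 := by simp
  simp only [show ¬ (X ≤ 0) from by omega, hmem, not_true_eq_false, or_false, if_false, hidx]
  have e1 : ((0 : Nat) : Int) + 1 = ((1 : Nat) : Int) := by norm_num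
  rw [e1, PySem.List.slice_from_natCast]
  simp only [List.drop_one, List.tail_cons]
  exact PySem.List.slice_to t (by omega)

-- A = B for positive X.
theorem eq_pos (S : List Int) (X : Int) (h0 : 0 < X) : Kanan S X = Kanan_alt S X := by
  induction S with
  | nil => simp [Kanan, Kanan_alt]
  | cons h t ih =>
      by_cases hh : h = X
      · subst hh
        simp only [Kanan, show h ≠ 0 from by omega, if_false, if_true]
        rw [alt_cons_self h t h0, Kanan1_eq]
        simp [show ¬ h = 0 from by omega, show ¬ h < 0 from by omega]
      · simp only [Kanan, show X ≠ 0 from by omega, if_false, if_neg hh]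
        rw [alt_cons_ne h X t hh]; exact ih

-- One-step unfolding of A past a non-matching head.
theorem Kanan_cons_ne (h X : Int) (t : List Int) (hh : h ≠ X) (h0 : X ≠ 0) :
    Kanan (h :: t) X = Kanan t X := by
  conv_lhs => rw [Kanan]
  simp [hh, h0]

-- A returns [] for negative X not occurring before S's last element.
theorem A_neg_nil (S : List Int) (X : Int) (hneg : X < 0) (hnd : X ∉ S.dropLast) :
    Kanan S X = [] := by
  induction S with
  | nil => simp [Kanan]
  | cons h t ih =>
      by_cases hh : h = X
      · subst hh
        cases t with
        | nil => simp [Kanan, show h ≠ 0 from by omega, Kanan1]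
        | cons a t' =>
            exfalso
            apply hnd
            simp [List.dropLast]
      · rw [Kanan_cons_ne h X t hh (by omega)]
        apply ih
        intro hmem
        apply hnd
        cases t with
        | nil => simp at hmem
        | cons a t' => simp [List.dropLast, hmem]

-- A returns a nonempty list inside D_.
theorem A_neg_ne_nil (S : List Int) (X : Int) (hneg : X < 0) (hd : X ∈ S.dropLast) :
    Kanan S X ≠ [] := by
  induction S with
  | nil => simp at hd
  | cons h t ih =>
      cases t with
      | nil => simp at hd
      | cons a t' =>
          by_cases hh : h = X
          · subst hh
            simp [Kanan, Kanan1, show h ≠ 0 from by omega]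
          · have hd' : X ∈ (a :: t').dropLast := by
              rcases (by simpa [List.dropLast] using hd : X = h ∨ X ∈ (a :: t').dropLast) with h1 | h1
              · exact absurd h1.symm hh
              · exact h1
            rw [Kanan_cons_ne h X (a :: t') hh (by omega)]
            exact ih hd'

-- ===== VERDICT (by name: the statements are the Claim_ definitions above) =====
theorem Kanan_spec : Claim_unchanged_Kanan := by
  intro S X _ hnD
  rcases lt_trichotomy X 0 with hneg | hz | hpos
  · have hnd : X ∉ S.dropLast := fun hm => hnD ⟨hneg, hm⟩
    rw [A_neg_nil S X hneg hnd, alt_nonpos S X (le_of_lt hneg)]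
  · subst hz
    rw [alt_nonpos S 0 le_rfl]
    cases S <;> simp [Kanan]
  · exact eq_pos S X hpos

theorem Kanan_changed : Claim_changed_Kanan := by unfold Claim_changed_Kanan; decide

theorem Kanan_tight : Claim_exact_Kanan := by
  intro S X _ hD
  rw [alt_nonpos S X (le_of_lt hD.1)]
  exact A_neg_ne_nil S X hD.1 hD.2
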